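-- pv_equiv track=rewrite | github.com/yasminat-codes/thepopebot | skills/retell-voice-agent-creator/sub-skills/pronunciation-fixer/scripts/generate-pronunciation.py | hint_to_ipa
-- ===== SOURCE A (Python) =====
-- PHONETIC_TO_IPA = {
--     # Vowels
--     "ee": "i:",
--     "ih": "I",
--     "ay": "eI",
--     "eh": "E",
--     "ah": "A:",
--     "uh": "@",
--     "oh": "oU",
--     "oo": "u:",
--     "aw": "O:",
--     "oy": "OI",
--     "ow": "aU",
--     "eye": "aI",
--     "ur": "3:",
--     "air": "E@",
--     "ear": "I@",
--     # Consonants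
--     "sh": "S",
--     "zh": "Z",
--     "ch": "tS",
--     "th": "T",
--     "dh": "D",
--     "ng": "N",
--     "j": "dZ",
--     "y": "j",
-- }
--
-- CHAR_TO_IPA = {
--     "a": "ae",
--     "b": "b",
--     "c": "k",
--     "d": "d",
--     "e": "E",
--     "f": "f",
--     "g": "g",
--     "h": "h",
--     "i": "I",
--     "k": "k",
--     "l": "l",
--     "m": "m",
--     "n": "n",
--     "o": "O:",
--     "p": "p",
--     "r": "r",
--     "s": "s",
--     "t": "t",
--     "u": "V",
--     "v": "v",
--     "w": "w",
--     "x": "ks",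
--     "z": "z",
-- }
--
-- def hint_to_ipa(hint):
--     """Convert a phonetic hint string to IPA notation.
--
--     Processes the hint from left to right, matching the longest possible
--     phonetic pattern first, then falling back to single characters.
--
--     Args:
--         hint: A phonetic hint string like "win", "shuh-vawn"
--
--     Returns:
--         An IPA string approximation
--     """
--     hint = hint.lower().strip()
--     # Remove hyphens used as syllable separators but note positions
--     syllables = hint.split("-")
--     ipa_parts = []
--
--     for syllable in syllables:
--         ipa = ""
--         i = 0
--         while i < len(syllable):
--             matched = False
--             # Try matching 3-char patterns first, then 2-char, then 1-char
--             for length in [3, 2]: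
--                 if i + length <= len(syllable):
--                     chunk = syllable[i:i + length]
--                     if chunk in PHONETIC_TO_IPA:
--                         ipa += PHONETIC_TO_IPA[chunk]
--                         i += length
--                         matched = True
--                         break
--             if not matched:
--                 char = syllable[i]
--                 if char in CHAR_TO_IPA:
--                     ipa += CHAR_TO_IPA[char]
--                 elif char.isalpha():
--                     # Unknown letter, pass through
--                     ipa += char
--                 i += 1
--         ipa_parts.append(ipa)
--
--     return ".".join(ipa_parts) if len(ipa_parts) > 1 else ipa_parts[0]
-- ===== SOURCE B (Python) =====
-- # Single-pass rule-table scanner: no hyphen split; one ordered rule list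
-- # (longest patterns first) scanned with startswith, '-' is just a rule.
--
-- MULTI_RULES = [
--     ("eye", "aI"), ("air", "E@"), ("ear", "I@"),
--     ("ee", "i:"), ("ih", "I"), ("ay", "eI"), ("eh", "E"), ("ah", "A:"),
--     ("uh", "@"), ("oh", "oU"), ("oo", "u:"), ("aw", "O:"), ("oy", "OI"),
--     ("ow", "aU"), ("ur", "3:"), ("sh", "S"), ("zh", "Z"), ("ch", "tS"),
--     ("th", "T"), ("dh", "D"), ("ng", "N"),
-- ]
--
-- SINGLE_RULES = [
--     ("a", "ae"), ("b", "b"), ("c", "k"), ("d", "d"), ("e", "E"),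
--     ("f", "f"), ("g", "g"), ("h", "h"), ("i", "I"), ("k", "k"),
--     ("l", "l"), ("m", "m"), ("n", "n"), ("o", "O:"), ("p", "p"),
--     ("r", "r"), ("s", "s"), ("t", "t"), ("u", "V"), ("v", "v"),
--     ("w", "w"), ("x", "ks"), ("z", "z"), ("-", "."),
-- ]
--
-- RULES = MULTI_RULES + SINGLE_RULES
--
--
-- def hint_to_ipa(hint):
--     """Convert a phonetic hint string to IPA notation (single rule-table pass)."""
--     s = hint.lower().strip()
--     out = []
--     i = 0
--     while i < len(s):
--         for tok, ipa in RULES: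
--             if s.startswith(tok, i):
--                 out.append(ipa)
--                 i += len(tok)
--                 break
--         else:
--             if s[i].isalpha():
--                 out.append(s[i])
--             i += 1
--     return "".join(out)
-- ===== Notes on version B (the rewrite author's own statement) =====
-- stated objective: alternative
-- what changed: Replaces A's hyphen-split plus per-syllable index/while matcher over two dicts by a single left-to-right pass over one ordered rule table (3-char, 2-char, then 1-char patterns, longest first) scanned with startswith; the hyphen is just another rule mapping to the syllable dot, so the split/join disappears.
import Mathlib
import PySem

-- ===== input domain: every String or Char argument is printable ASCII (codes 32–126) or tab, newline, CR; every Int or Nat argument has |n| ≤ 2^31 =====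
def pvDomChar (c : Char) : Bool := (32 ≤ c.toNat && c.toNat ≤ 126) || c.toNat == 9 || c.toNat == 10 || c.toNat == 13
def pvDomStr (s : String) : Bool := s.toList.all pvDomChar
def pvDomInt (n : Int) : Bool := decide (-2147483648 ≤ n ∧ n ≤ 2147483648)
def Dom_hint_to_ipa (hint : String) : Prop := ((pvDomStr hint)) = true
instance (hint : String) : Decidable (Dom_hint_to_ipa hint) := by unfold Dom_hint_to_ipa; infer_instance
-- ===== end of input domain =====

-- B replaces A's hyphen-split + per-syllable greedy dict matcher by a single left-to-right
-- pass over one ordered rule table (longest patterns first; '-' is just a rule mapping to '.').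


-- ===== PORT A =====
def pvPhon : PySem.Dict (List Char) (List Char) := PySem.Dict.mk [
  (['e', 'e'], ['i', ':']),
  (['i', 'h'], ['I']),
  (['a', 'y'], ['e', 'I']),
  (['e', 'h'], ['E']),
  (['a', 'h'], ['A', ':']),
  (['u', 'h'], ['@']),
  (['o', 'h'], ['o', 'U']),
  (['o', 'o'], ['u', ':']),
  (['a', 'w'], ['O', ':']),
  (['o', 'y'], ['O', 'I']),
  (['o', 'w'], ['a', 'U']),
  (['e', 'y', 'e'], ['a', 'I']),
  (['u', 'r'], ['3', ':']),
  (['a', 'i', 'r'], ['E', '@']),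
  (['e', 'a', 'r'], ['I', '@']),
  (['s', 'h'], ['S']),
  (['z', 'h'], ['Z']),
  (['c', 'h'], ['t', 'S']),
  (['t', 'h'], ['T']),
  (['d', 'h'], ['D']),
  (['n', 'g'], ['N']),
  (['j'], ['d', 'Z']),
  (['y'], ['j'])]

def pvChar : PySem.Dict (List Char) (List Char) := PySem.Dict.mk [
  (['a'], ['a', 'e']),
  (['b'], ['b']),
  (['c'], ['k']),
  (['d'], ['d']),
  (['e'], ['E']),
  (['f'], ['f']),
  (['g'], ['g']),
  (['h'], ['h']),
  (['i'], ['I']),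
  (['k'], ['k']),
  (['l'], ['l']),
  (['m'], ['m']),
  (['n'], ['n']),
  (['o'], ['O', ':']),
  (['p'], ['p']),
  (['r'], ['r']),
  (['s'], ['s']),
  (['t'], ['t']),
  (['u'], ['V']),
  (['v'], ['v']),
  (['w'], ['w']),
  (['x'], ['k', 's']),
  (['z'], ['z'])]

-- A's inner while loop over one syllable; the index i becomes recursion on the suffix syllable[i:]
def pvLoopA : List Char → List Char
  | [] => []
  | c :: rest =>
    match (if 3 ≤ (c :: rest).length then PySem.Dict.get? pvPhon ((c :: rest).take 3) else none) with
    | some v => v ++ pvLoopA (rest.drop 2)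
    | none =>
      match (if 2 ≤ (c :: rest).length then PySem.Dict.get? pvPhon ((c :: rest).take 2) else none) with
      | some v => v ++ pvLoopA (rest.drop 1)
      | none =>
        (match PySem.Dict.get? pvChar [c] with
         | some v => v
         | none => if PySem.Chars.isalpha c then [c] else []) ++ pvLoopA rest
termination_by l => l.length
decreasing_by all_goals (simp [List.length_drop]; try omega)

def hint_to_ipa (hint : String) : String :=
  let h := PySem.Chars.strip (PySem.Chars.lower hint.toList)
  let syllables := PySem.Chars.splitOn h ['-']      -- hint.split("-"): sep non-empty, never raises
  let ipa_parts := syllables.map pvLoopA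
  -- ".".join(ipa_parts) if len(ipa_parts) > 1 else ipa_parts[0]  (split always yields ≥ 1 part)
  String.ofList (if 1 < ipa_parts.length then PySem.Chars.join ['.'] ipa_parts else ipa_parts.headD [])

-- ===== PORT B =====
-- the multi-character rules, longest first (so the scan is greedy longest-match)
def pvMulti : List (String × String) := [
  ("eye", "aI"), ("air", "E@"), ("ear", "I@"),
  ("ee", "i:"), ("ih", "I"), ("ay", "eI"), ("eh", "E"), ("ah", "A:"),
  ("uh", "@"), ("oh", "oU"), ("oo", "u:"), ("aw", "O:"), ("oy", "OI"),
  ("ow", "aU"), ("ur", "3:"), ("sh", "S"), ("zh", "Z"), ("ch", "tS"),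
  ("th", "T"), ("dh", "D"), ("ng", "N")]

-- the single-character rules; the hyphen is just a rule mapping to the syllable dot
def pvSingle : List (String × String) := [
  ("a", "ae"), ("b", "b"), ("c", "k"), ("d", "d"), ("e", "E"),
  ("f", "f"), ("g", "g"), ("h", "h"), ("i", "I"), ("k", "k"),
  ("l", "l"), ("m", "m"), ("n", "n"), ("o", "O:"), ("p", "p"),
  ("r", "r"), ("s", "s"), ("t", "t"), ("u", "V"), ("v", "v"),
  ("w", "w"), ("x", "ks"), ("z", "z"), ("-", ".")]

def pvRules : List (String × String) := pvMulti ++ pvSingle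

-- the while loop: at position i take the first rule whose pattern starts here (s.startswith(tok, i));
-- else keep an alphabetic char, drop anything else; i becomes recursion on the suffix s[i:]
def pvScanB : List Char → List Char
  | [] => []
  | c :: rest =>
    match List.find? (fun r => r.1.toList.isPrefixOf (c :: rest)) pvRules with
    | some r => r.2.toList ++ pvScanB (rest.drop (r.1.toList.length - 1))
    | none => (if PySem.Chars.isalpha c then [c] else []) ++ pvScanB rest
termination_by l => l.length
decreasing_by all_goals (simp [List.length_drop]; try omega)

def hint_to_ipa_alt (hint : String) : String :=
  String.ofList (pvScanB (PySem.Chars.strip (PySem.Chars.lower hint.toList)))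

-- ===== PRECONDITION & SPEC =====
def Spec_hint_to_ipa (hint : String) (out : String) : Prop := out = hint_to_ipa_alt hint
instance (hint : String) (out : String) : Decidable (Spec_hint_to_ipa hint out) := by unfold Spec_hint_to_ipa; infer_instance

-- ===== CLAIM (what is proved, stated in full; the proofs are below) =====
def Claim_equal_hint_to_ipa : Prop := ∀ (hint : String), Dom_hint_to_ipa hint → Spec_hint_to_ipa hint (hint_to_ipa hint)

-- ===== LEMMAS AND PROOFS =====

-- proof-side replay of A's matcher interface, used to characterise both scans

def pvPats : List (List Char) :=
  ((pvPhon.items.map (·.1)).filter (fun k => k.length == 3))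
    ++ ((pvPhon.items.map (·.1)).filter (fun k => k.length == 2))

def pvFirstMatch (cs : List Char) : List (List Char) → Option (List Char)
  | [] => none
  | k :: ks => if cs.take k.length = k then some k else pvFirstMatch cs ks

def pvRepl (tok : List Char) : List Char :=
  if 1 < tok.length then (PySem.Dict.get? pvPhon tok).getD []
  else match tok with
    | [c] =>
      match PySem.Dict.get? pvChar [c] with
      | some v => v
      | none => if c = '-' then ['.'] else if PySem.Chars.isalpha c then [c] else []
    | _ => []

def pvScanOld : List Char → List Char
  | [] => []
  | c :: rest =>
    match pvFirstMatch (c :: rest) pvPats with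
    | some k => pvRepl k ++ pvScanOld (rest.drop (k.length - 1))
    | none => pvRepl [c] ++ pvScanOld rest
termination_by l => l.length
decreasing_by all_goals (simp [List.length_drop]; try omega)

def pvSplitC : List Char → List (List Char)
  | [] => [[]]
  | a :: r => if a = '-' then [] :: pvSplitC r else (pvSplitC r).modifyHead (a :: ·)

lemma pvSplitC_head : ∀ l : List Char, ∃ t, pvSplitC l = (l.takeWhile (· ≠ '-')) :: t := by
  intro l
  induction l with
  | nil => exact ⟨[], rfl⟩
  | cons a r ih =>
    obtain ⟨t, ht⟩ := ih
    by_cases ha : a = '-'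
    · exact ⟨pvSplitC r, by simp [pvSplitC, ha, List.takeWhile]⟩
    · refine ⟨t, ?_⟩
      simp [pvSplitC, ha, ht, List.modifyHead]

lemma pvSplitOn_go_eq : ∀ (fuel : Nat) (l cur : List Char) (acc : List (List Char)),
    l.length < fuel →
    PySem.Chars.splitOn.go ['-'] fuel l cur acc
      = acc.reverse ++ (pvSplitC l).modifyHead (cur.reverse ++ ·) := by
  intro fuel
  induction fuel with
  | zero => intro l cur acc h; omega
  | succ n ih =>
    intro l cur acc h
    match l with
    | [] => simp [PySem.Chars.splitOn.go, pvSplitC]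
    | c :: rest =>
      rw [PySem.Chars.splitOn.go]
      by_cases hc : c = '-'
      · subst hc
        have hpre : List.isPrefixOf ['-'] ('-' :: rest) = true := by simp [List.isPrefixOf]
        simp only [hpre, if_pos]
        rw [ih] ; swap
        · simpa using Nat.lt_of_succ_lt_succ h
        · obtain ⟨t, ht⟩ := pvSplitC_head rest
          simp [pvSplitC, ht, List.modifyHead]
      · have hpre : List.isPrefixOf ['-'] (c :: rest) = false := by
          simp [List.isPrefixOf]; exact fun hh => absurd hh.symm hc
        simp only [hpre]
        rw [if_neg (by simp)]
        rw [ih _ _ _ (by simpa using Nat.lt_of_succ_lt_succ h)]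
        obtain ⟨t, ht⟩ := pvSplitC_head rest
        simp [pvSplitC, hc, ht, List.modifyHead]

lemma pvSplitOn_dash (l : List Char) : PySem.Chars.splitOn l ['-'] = pvSplitC l := by
  have h := pvSplitOn_go_eq (l.length + 1) l [] [] (by omega)
  obtain ⟨t, ht⟩ := pvSplitC_head l
  simpa [PySem.Chars.splitOn, ht, List.modifyHead] using h

lemma pvJoin_head_append (p x : List Char) (t : List (List Char)) :
    PySem.Chars.join ['.'] ((p ++ x) :: t) = p ++ PySem.Chars.join ['.'] (x :: t) := by
  cases t with
  | nil => simp [PySem.Chars.join_singleton]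
  | cons q t' => simp [PySem.Chars.join_cons_cons]

def pvAHead (cs : List Char) : Option (List Char × Nat) :=
  match (if 3 ≤ cs.length then PySem.Dict.get? pvPhon (cs.take 3) else none) with
  | some v => some (v, 3)
  | none =>
    match (if 2 ≤ cs.length then PySem.Dict.get? pvPhon (cs.take 2) else none) with
    | some v => some (v, 2)
    | none => none

lemma pvFirstMatch_eq_find? (cs : List Char) : ∀ ks : List (List Char),
    pvFirstMatch cs ks = ks.find? (fun k => decide (cs.take k.length = k)) := by
  intro ks
  induction ks with
  | nil => rfl
  | cons p ps ih =>
    rw [pvFirstMatch, List.find?]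
    by_cases hp : cs.take p.length = p
    · simp [hp]
    · simp only [hp, decide_false]
      exact ih

lemma pvFindLen (cs : List Char) (n : Nat) :
    List.find? (fun k => decide (cs.take k.length = k))
        ((pvPhon.items.map (·.1)).filter (fun k => k.length == n))
      = if n ≤ cs.length then (pvPhon.items.find? (fun p => p.1 == cs.take n)).map (·.1) else none := by
  rw [List.find?_filter, List.find?_map]
  by_cases h : n ≤ cs.length
  · rw [if_pos h]
    have hpred : ((fun a => decide ((a.length == n) = true ∧ decide (cs.take a.length = a) = true)) ∘ (fun p : List Char × List Char => p.1))
        = fun p : List Char × List Char => (p.1 == cs.take n) := by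
      funext p
      simp only [Function.comp_apply]
      by_cases hq : p.1 = cs.take n
      · have hl : p.1.length = n := by
          rw [hq, List.length_take]; omega
        simp [hq, h]
      · have hrhs : (p.1 == cs.take n) = false := by simp [hq]
        rw [hrhs, decide_eq_false_iff_not]
        rintro ⟨h1, h2⟩
        rw [beq_iff_eq] at h1
        rw [decide_eq_true_eq] at h2
        rw [h1] at h2
        exact hq h2.symm
    rw [hpred]
  · rw [if_neg h]
    rw [List.find?_eq_none.mpr]
    · rfl
    · intro p _
      simp only [Function.comp_apply, decide_eq_true_eq, not_and, beq_iff_eq]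
      intro h1 h2
      have h4 : (cs.take p.1.length).length = p.1.length := by rw [h2]
      rw [List.length_take] at h4
      omega

lemma pvBridgeN (cs : List Char) (n : Nat) (hn : 1 < n) :
    ((if n ≤ cs.length then (pvPhon.items.find? (fun p => p.1 == cs.take n)).map (·.1) else none).map
        (fun k => (pvRepl k, k.length)))
      = match (if n ≤ cs.length then PySem.Dict.get? pvPhon (cs.take n) else none) with
        | some v => some (v, n)
        | none => none := by
  by_cases h : n ≤ cs.length
  · rw [if_pos h, if_pos h]
    cases hf : pvPhon.items.find? (fun p => p.1 == cs.take n) with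
    | none =>
      rw [PySem.Dict.get?, hf]
      rfl
    | some pv =>
      have hk : pv.1 = cs.take n := by
        have := List.find?_some hf
        simpa using this
      have hkl : pv.1.length = n := by rw [hk, List.length_take]; omega
      have hget : PySem.Dict.get? pvPhon pv.1 = some pv.2 := by
        rw [PySem.Dict.get?, hk, hf]
        rfl
      rw [PySem.Dict.get?, hf]
      simp only [Option.map_some]
      have h1 : 1 < pv.1.length := by omega
      simp [pvRepl, hget, hkl, hn]
  · rw [if_neg h, if_neg h]
    rfl

lemma pvBridge (cs : List Char) :
    (pvFirstMatch cs pvPats).map (fun k => (pvRepl k, k.length)) = pvAHead cs := by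
  rw [pvFirstMatch_eq_find?]
  rw [pvPats, List.find?_append, pvFindLen cs 3, pvFindLen cs 2]
  rw [Option.map_or]
  rw [pvBridgeN cs 3 (by omega), pvBridgeN cs 2 (by omega)]
  rw [pvAHead]
  cases hg3 : (if 3 ≤ cs.length then PySem.Dict.get? pvPhon (cs.take 3) else none) with
  | some v => rfl
  | none =>
    cases hg2 : (if 2 ≤ cs.length then PySem.Dict.get? pvPhon (cs.take 2) else none) with
    | some v => rfl
    | none => rfl

lemma pvPats_facts : ∀ k ∈ pvPats, ('-' ∉ k) ∧ (k.length = 3 ∨ k.length = 2) := by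
  decide

lemma pvFirstMatch_sound {cs k : List Char} {ks : List (List Char)}
    (h : pvFirstMatch cs ks = some k) : k ∈ ks ∧ cs.take k.length = k := by
  induction ks with
  | nil => simp [pvFirstMatch] at h
  | cons p ps ih =>
    rw [pvFirstMatch] at h
    by_cases hp : cs.take p.length = p
    · rw [if_pos hp] at h
      obtain rfl : p = k := by simpa using h
      exact ⟨List.mem_cons_self, hp⟩
    · rw [if_neg hp] at h
      obtain ⟨h1, h2⟩ := ih h
      exact ⟨List.mem_cons_of_mem _ h1, h2⟩

def pvF (l : List Char) : List Char := PySem.Chars.join ['.'] ((pvSplitC l).map pvLoopA)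

lemma pvTakeWhile_cons {p : Char → Bool} {l : List Char} {d : Char} {w : List Char}
    (h : l.takeWhile p = d :: w) : ∃ l', l = d :: l' ∧ p d = true ∧ l'.takeWhile p = w := by
  cases l with
  | nil => simp at h
  | cons e l' =>
    by_cases he : p e
    · rw [List.takeWhile_cons_of_pos he] at h
      injection h with h1 h2
      subst h1
      exact ⟨l', rfl, he, h2⟩
    · rw [List.takeWhile_cons_of_neg he] at h
      simp at h

lemma pvMain : ∀ l : List Char, pvScanOld l = pvF l := by
  intro l
  induction l using pvScanOld.induct with
  | case1 =>
    rw [pvScanOld, pvF]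
    simp [pvSplitC, pvLoopA, PySem.Chars.join_singleton]
  | case2 c rest k hm ih =>
    have hb := pvBridge (c :: rest)
    rw [hm] at hb
    simp only [Option.map_some] at hb
    obtain ⟨hmem, htake⟩ := pvFirstMatch_sound hm
    obtain ⟨hdash, hlen⟩ := pvPats_facts k hmem
    have hstep : pvScanOld (c :: rest) = pvRepl k ++ pvScanOld (rest.drop (k.length - 1)) := by
      rw [pvScanOld, hm]
    rw [hstep]
    cases hlen with
    | inl h3 =>
      have hlen3 : 3 ≤ (c :: rest).length := by
        have := congrArg List.length htake
        rw [List.length_take] at this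
        omega
      cases rest with
      | nil => simp at hlen3
      | cons k2 rest2 =>
      cases rest2 with
      | nil => simp at hlen3
      | cons k3 r3 =>
      have hk : k = [c, k2, k3] := by
        rw [h3] at htake; simpa using htake.symm
      have hc : c ≠ '-' := by rw [hk] at hdash; simp at hdash; tauto
      have hk2 : k2 ≠ '-' := by rw [hk] at hdash; simp at hdash; tauto
      have hk3 : k3 ≠ '-' := by rw [hk] at hdash; simp at hdash; tauto
      have hget : PySem.Dict.get? pvPhon ((c :: k2 :: k3 :: r3).take 3) = some (pvRepl k) := by
        rw [pvAHead] at hb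
        rw [if_pos hlen3] at hb
        cases hg : PySem.Dict.get? pvPhon ((c :: k2 :: k3 :: r3).take 3) with
        | some v => rw [hg] at hb; simp at hb; rw [hb.1]
        | none =>
          rw [hg] at hb
          cases hg2 : (if 2 ≤ (c :: k2 :: k3 :: r3).length then PySem.Dict.get? pvPhon ((c :: k2 :: k3 :: r3).take 2) else none) with
          | some v => rw [hg2] at hb; simp at hb; omega
          | none => rw [hg2] at hb; simp at hb
      obtain ⟨t3, ht3⟩ := pvSplitC_head r3
      have hsplit : pvSplitC (c :: k2 :: k3 :: r3)
          = (c :: k2 :: k3 :: r3.takeWhile (· ≠ '-')) :: t3 := by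
        simp [pvSplitC, hc, hk2, hk3, ht3]
      have hloop : pvLoopA (c :: k2 :: k3 :: r3.takeWhile (· ≠ '-'))
          = pvRepl k ++ pvLoopA (r3.takeWhile (· ≠ '-')) := by
        rw [pvLoopA]
        have hg3 : PySem.Dict.get? pvPhon ((c :: k2 :: k3 :: r3.takeWhile (· ≠ '-')).take 3)
            = some (pvRepl k) := by
          simpa using hget
        rw [if_pos (by simp)]
        rw [hg3]
        simp
      have hdrop : List.drop (k.length - 1) (k2 :: k3 :: r3) = r3 := by simp [hk]
      rw [hdrop] at ih ⊢
      rw [pvF, hsplit, List.map_cons, hloop, pvJoin_head_append, ih, pvF, ht3]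
      simp
    | inr h2 =>
      have hlen2 : 2 ≤ (c :: rest).length := by
        have := congrArg List.length htake
        rw [List.length_take] at this
        omega
      cases rest with
      | nil => simp at hlen2
      | cons k2 r2 =>
      have hk : k = [c, k2] := by
        rw [h2] at htake; simpa using htake.symm
      have hc : c ≠ '-' := by rw [hk] at hdash; simp at hdash; tauto
      have hk2 : k2 ≠ '-' := by rw [hk] at hdash; simp at hdash; tauto
      rw [pvAHead] at hb
      have hg3 : (if 3 ≤ (c :: k2 :: r2).length then PySem.Dict.get? pvPhon ((c :: k2 :: r2).take 3) else none) = none := by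
        cases hg : (if 3 ≤ (c :: k2 :: r2).length then PySem.Dict.get? pvPhon ((c :: k2 :: r2).take 3) else none) with
        | none => rfl
        | some v => rw [hg] at hb; simp at hb; omega
      have hget : PySem.Dict.get? pvPhon ((c :: k2 :: r2).take 2) = some (pvRepl k) := by
        rw [hg3] at hb
        rw [if_pos hlen2] at hb
        cases hg : PySem.Dict.get? pvPhon ((c :: k2 :: r2).take 2) with
        | some v => rw [hg] at hb; simp at hb; rw [hb.1]
        | none => rw [hg] at hb; simp at hb
      obtain ⟨t2, ht2⟩ := pvSplitC_head r2
      have hsplit : pvSplitC (c :: k2 :: r2) = (c :: k2 :: r2.takeWhile (· ≠ '-')) :: t2 := by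
        simp [pvSplitC, hc, hk2, ht2]
      have hloop : pvLoopA (c :: k2 :: r2.takeWhile (· ≠ '-'))
          = pvRepl k ++ pvLoopA (r2.takeWhile (· ≠ '-')) := by
        rw [pvLoopA]
        have hnone3 : (if 3 ≤ (c :: k2 :: r2.takeWhile (· ≠ '-')).length
            then PySem.Dict.get? pvPhon ((c :: k2 :: r2.takeWhile (· ≠ '-')).take 3) else none) = none := by
          cases hw : r2.takeWhile (· ≠ '-') with
          | nil => simp
          | cons d w' =>
            obtain ⟨r2', rfl, hd, hw'⟩ := pvTakeWhile_cons hw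
            rw [if_pos (by simp)] at hg3 ⊢
            exact hg3
        rw [hnone3]
        have hg2' : PySem.Dict.get? pvPhon ((c :: k2 :: r2.takeWhile (· ≠ '-')).take 2)
            = some (pvRepl k) := by simpa using hget
        rw [if_pos (by simp)]
        rw [hg2']
        simp
      have hdrop : List.drop (k.length - 1) (k2 :: r2) = r2 := by simp [hk]
      rw [hdrop] at ih ⊢
      rw [pvF, hsplit, List.map_cons, hloop, pvJoin_head_append, ih, pvF, ht2]
      simp
  | case3 c rest hm ih =>
    have hb := pvBridge (c :: rest)
    rw [hm] at hb
    simp only [Option.map_none] at hb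
    have hstep : pvScanOld (c :: rest) = pvRepl [c] ++ pvScanOld rest := by
      rw [pvScanOld, hm]
    rw [hstep]
    by_cases hc : c = '-'
    · subst hc
      have hrepl : pvRepl ['-'] = ['.'] := by decide
      rw [hrepl]
      obtain ⟨t, ht⟩ := pvSplitC_head rest
      rw [pvF]
      have hsplit : pvSplitC ('-' :: rest) = [] :: rest.takeWhile (· ≠ '-') :: t := by
        simp [pvSplitC, ht]
      rw [hsplit]
      simp only [List.map_cons]
      rw [show pvLoopA [] = ([] : List Char) from by rw [pvLoopA]]
      rw [PySem.Chars.join_cons_cons]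
      rw [ih, pvF, ht]
      simp
    · rw [pvAHead] at hb
      have hg3 : (if 3 ≤ (c :: rest).length then PySem.Dict.get? pvPhon ((c :: rest).take 3) else none) = none := by
        cases hg : (if 3 ≤ (c :: rest).length then PySem.Dict.get? pvPhon ((c :: rest).take 3) else none) with
        | none => rfl
        | some v => rw [hg] at hb; simp at hb
      have hg2 : (if 2 ≤ (c :: rest).length then PySem.Dict.get? pvPhon ((c :: rest).take 2) else none) = none := by
        rw [hg3] at hb
        cases hg : (if 2 ≤ (c :: rest).length then PySem.Dict.get? pvPhon ((c :: rest).take 2) else none) with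
        | none => rfl
        | some v => rw [hg] at hb; simp at hb
      obtain ⟨t, ht⟩ := pvSplitC_head rest
      have hsplit : pvSplitC (c :: rest) = (c :: rest.takeWhile (· ≠ '-')) :: t := by
        simp [pvSplitC, hc, ht]
      have hloop : pvLoopA (c :: rest.takeWhile (· ≠ '-'))
          = pvRepl [c] ++ pvLoopA (rest.takeWhile (· ≠ '-')) := by
        rw [pvLoopA]
        have hnone3 : (if 3 ≤ (c :: rest.takeWhile (· ≠ '-')).length
            then PySem.Dict.get? pvPhon ((c :: rest.takeWhile (· ≠ '-')).take 3) else none) = none := by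
          cases hw : rest.takeWhile (· ≠ '-') with
          | nil => simp
          | cons d w' =>
            obtain ⟨rest', rfl, hd, hw'⟩ := pvTakeWhile_cons hw
            cases hw2 : w' with
            | nil => simp
            | cons d2 w'' =>
              rw [hw2] at hw'
              obtain ⟨rest'', rfl, hd2, hw''⟩ := pvTakeWhile_cons hw'
              rw [if_pos (by simp)] at hg3
              rw [if_pos (by simp)]
              exact hg3
        rw [hnone3]
        have hnone2 : (if 2 ≤ (c :: rest.takeWhile (· ≠ '-')).length
            then PySem.Dict.get? pvPhon ((c :: rest.takeWhile (· ≠ '-')).take 2) else none) = none := by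
          cases hw : rest.takeWhile (· ≠ '-') with
          | nil => simp
          | cons d w' =>
            obtain ⟨rest', rfl, hd, hw'⟩ := pvTakeWhile_cons hw
            rw [if_pos (by simp)] at hg2
            rw [if_pos (by simp)]
            exact hg2
        rw [hnone2]
        have hrepl : pvRepl [c] = (match PySem.Dict.get? pvChar [c] with
            | some v => v
            | none => if PySem.Chars.isalpha c then [c] else []) := by
          rw [pvRepl]
          rw [if_neg (by simp)]
          cases hgc : PySem.Dict.get? pvChar [c] with
          | some v => simp
          | none => simp [hc]
        rw [hrepl]
      rw [pvF, hsplit, List.map_cons, hloop, pvJoin_head_append, ih, pvF, ht]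
      simp

-- ===== bridging the new rule-table scan to pvScanOld =====

lemma pvFind?_congr {α : Type} (l : List α) (p q : α → Bool) (h : ∀ a ∈ l, p a = q a) :
    l.find? p = l.find? q := by
  induction l with
  | nil => rfl
  | cons a r ih =>
    rw [List.find?, List.find?, h a List.mem_cons_self]
    cases hq : q a with
    | true => rfl
    | false => exact ih (fun b hb => h b (List.mem_cons_of_mem _ hb))

lemma pvPairsLen (cs : List Char) (n : Nat) :
    ((pvPhon.items.filter (fun p => p.1.length == n)).find? (fun q => q.1.isPrefixOf cs)).map
        (fun q => (q.2, q.1.length))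
      = if n ≤ cs.length then (PySem.Dict.get? pvPhon (cs.take n)).map (fun v => (v, n)) else none := by
  rw [List.find?_filter]
  by_cases h : n ≤ cs.length
  · rw [if_pos h]
    have hpred : (fun p : List Char × List Char =>
        decide ((p.1.length == n) = true ∧ p.1.isPrefixOf cs = true)) = fun p => (p.1 == cs.take n) := by
      funext p
      by_cases hq : p.1 = cs.take n
      · have hl : p.1.length = n := by rw [hq, List.length_take]; omega
        simp [hq]
        exact ⟨h, List.take_prefix n cs⟩
      · have hrhs : (p.1 == cs.take n) = false := by simp [hq]
        rw [hrhs, decide_eq_false_iff_not]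
        rintro ⟨h1, h2⟩
        rw [beq_iff_eq] at h1
        rw [List.isPrefixOf_iff_prefix] at h2
        have := List.prefix_iff_eq_take.mp h2
        rw [h1] at this
        exact hq this
    rw [hpred]
    cases hf : pvPhon.items.find? (fun p => p.1 == cs.take n) with
    | none => rw [PySem.Dict.get?, hf]; rfl
    | some pv =>
      have hk : pv.1 = cs.take n := by
        have := List.find?_some hf
        simpa using this
      have hkl : pv.1.length = n := by rw [hk, List.length_take]; omega
      rw [PySem.Dict.get?, hf]
      simp [hkl]
  · rw [if_neg h]
    rw [List.find?_eq_none.mpr]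
    · rfl
    · intro p _
      simp only [decide_eq_true_eq, not_and, beq_iff_eq]
      intro h1 h2
      rw [List.isPrefixOf_iff_prefix] at h2
      have := List.IsPrefix.length_le h2
      omega

lemma pvMulti_map :
    pvMulti.map (fun r : String × String => (r.1.toList, r.2.toList))
      = (pvPhon.items.filter (fun p => p.1.length == 3))
          ++ (pvPhon.items.filter (fun p => p.1.length == 2)) := by
  decide

lemma pvSingle_map :
    pvSingle.map (fun r : String × String => (r.1.toList, r.2.toList))
      = pvChar.items ++ [(['-'], ['.'])] := by
  decide

lemma pvRuleFind (rules : List (String × String)) (cs : List Char) :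
    (rules.find? (fun r => r.1.toList.isPrefixOf cs)).map (fun r => (r.2.toList, r.1.toList.length))
      = ((rules.map (fun r : String × String => (r.1.toList, r.2.toList))).find?
          (fun q => q.1.isPrefixOf cs)).map (fun q => (q.2, q.1.length)) := by
  rw [List.find?_map]
  cases hf : rules.find? (fun r => r.1.toList.isPrefixOf cs) with
  | none =>
    have : rules.find? ((fun q : List Char × List Char => q.1.isPrefixOf cs)
        ∘ (fun r : String × String => (r.1.toList, r.2.toList))) = none := hf
    rw [this]; rfl
  | some r =>
    have : rules.find? ((fun q : List Char × List Char => q.1.isPrefixOf cs)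
        ∘ (fun r : String × String => (r.1.toList, r.2.toList))) = some r := hf
    rw [this]; rfl

lemma pvBridgeMulti (cs : List Char) :
    (pvMulti.find? (fun r => r.1.toList.isPrefixOf cs)).map (fun r => (r.2.toList, r.1.toList.length))
      = pvAHead cs := by
  rw [pvRuleFind, pvMulti_map, List.find?_append, Option.map_or,
      pvPairsLen cs 3, pvPairsLen cs 2, pvAHead]
  have hcomm : ∀ (c : Prop) [Decidable c] (o : Option (List Char)) (n : Nat),
      (if c then o.map (fun v => (v, n)) else none) = (if c then o else none).map (fun v => (v, n)) := by
    intro c _ o n; split <;> simp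
  rw [hcomm, hcomm]
  cases hg3 : (if 3 ≤ cs.length then PySem.Dict.get? pvPhon (cs.take 3) else none) with
  | some v => simp
  | none =>
    simp only [Option.map_none, Option.none_or]
    cases hg2 : (if 2 ≤ cs.length then PySem.Dict.get? pvPhon (cs.take 2) else none) with
    | some v => simp
    | none => simp

lemma pvBridgeSingle (c : Char) (rest : List Char) :
    (pvSingle.find? (fun r => r.1.toList.isPrefixOf (c :: rest))).map
        (fun r => (r.2.toList, r.1.toList.length))
      = match PySem.Dict.get? pvChar [c] with
        | some v => some (v, 1)
        | none => if c = '-' then some (['.'], 1) else none := by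
  rw [pvRuleFind, pvSingle_map]
  have hcongr : ((pvChar.items ++ [(['-'], ['.'])]).find? (fun q => q.1.isPrefixOf (c :: rest)))
      = ((pvChar.items ++ [(['-'], ['.'])]).find? (fun q => q.1 == [c])) := by
    apply pvFind?_congr
    intro q hq
    have hlen : q.1.length = 1 := by
      have : ∀ q ∈ pvChar.items ++ [(['-'], ['.'])], q.1.length = 1 := by decide
      exact this q hq
    obtain ⟨x, hx⟩ : ∃ x, q.1 = [x] := by
      cases hq1 : q.1 with
      | nil => rw [hq1] at hlen; simp at hlen
      | cons x t =>
        rw [hq1] at hlen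
        cases t with
        | nil => exact ⟨x, rfl⟩
        | cons _ _ => simp at hlen
    rw [hx]
    by_cases hxc : x = c
    · simp [hxc, List.isPrefixOf]
    · simp [List.isPrefixOf]
  rw [hcongr, List.find?_append]
  cases hf : pvChar.items.find? (fun q => q.1 == [c]) with
  | some pv =>
    have hk : pv.1 = [c] := by
      have := List.find?_some hf
      simpa using this
    rw [PySem.Dict.get?, hf]
    simp [hk]
  | none =>
    rw [PySem.Dict.get?, hf]
    simp only [Option.none_or]
    by_cases hc : c = '-'
    · subst hc
      rw [List.find?]
      simp
    · rw [List.find?]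
      have hne : ((['-'] : List Char) == [c]) = false := by
        simp
        exact fun hh => hc hh.symm
      simp [hne, hc]

lemma pvStepEq (c : Char) (rest : List Char) :
    (match pvRules.find? (fun r => r.1.toList.isPrefixOf (c :: rest)) with
     | some r => (r.2.toList, r.1.toList.length)
     | none => ((if PySem.Chars.isalpha c then [c] else []), 1))
      = (match pvFirstMatch (c :: rest) pvPats with
         | some k => (pvRepl k, k.length)
         | none => (pvRepl [c], 1)) := by
  have hr : pvRules = pvMulti ++ pvSingle := rfl
  rw [hr, List.find?_append]
  have hm := pvBridgeMulti (c :: rest)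
  have hb := pvBridge (c :: rest)
  cases hMf : pvMulti.find? (fun r => r.1.toList.isPrefixOf (c :: rest)) with
  | some r =>
    rw [hMf] at hm
    simp only [Option.map_some] at hm
    rw [← hm] at hb
    cases hFm : pvFirstMatch (c :: rest) pvPats with
    | none => rw [hFm] at hb; simp at hb
    | some k =>
      rw [hFm] at hb
      simp only [Option.map_some, Option.some.injEq] at hb
      simp only [Option.some_or]
      rw [hb]
  | none =>
    rw [hMf] at hm
    simp only [Option.map_none] at hm
    rw [← hm] at hb
    have hFm : pvFirstMatch (c :: rest) pvPats = none := by
      cases hFm : pvFirstMatch (c :: rest) pvPats with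
      | none => rfl
      | some k => rw [hFm] at hb; simp at hb
    rw [hFm]
    simp only [Option.none_or]
    have hs := pvBridgeSingle c rest
    have hrepl : pvRepl [c] = (match PySem.Dict.get? pvChar [c] with
        | some v => v
        | none => if c = '-' then ['.'] else if PySem.Chars.isalpha c then [c] else []) := by
      rw [pvRepl]; rw [if_neg (by simp)]
    cases hgc : PySem.Dict.get? pvChar [c] with
    | some v =>
      rw [hgc] at hs
      cases hSf : pvSingle.find? (fun r => r.1.toList.isPrefixOf (c :: rest)) with
      | none => rw [hSf] at hs; simp at hs
      | some r =>
        rw [hSf] at hs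
        simp only [Option.map_some, Option.some.injEq] at hs
        show (r.2.toList, r.1.toList.length) = (pvRepl [c], 1)
        rw [hs, hrepl, hgc]
    | none =>
      rw [hgc] at hs
      by_cases hc : c = '-'
      · rw [if_pos hc] at hs
        cases hSf : pvSingle.find? (fun r => r.1.toList.isPrefixOf (c :: rest)) with
        | none => rw [hSf] at hs; simp at hs
        | some r =>
          rw [hSf] at hs
          simp only [Option.map_some, Option.some.injEq] at hs
          show (r.2.toList, r.1.toList.length) = (pvRepl [c], 1)
          rw [hs, hrepl, hgc, if_pos hc]
      · rw [if_neg hc] at hs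
        cases hSf : pvSingle.find? (fun r => r.1.toList.isPrefixOf (c :: rest)) with
        | some r => rw [hSf] at hs; simp at hs
        | none =>
          show ((if PySem.Chars.isalpha c then [c] else []), 1) = (pvRepl [c], 1)
          rw [hrepl, hgc, if_neg hc]

lemma pvScanB_step (c : Char) (rest : List Char) :
    pvScanB (c :: rest)
      = (match pvRules.find? (fun r : String × String => r.1.toList.isPrefixOf (c :: rest)) with
         | some r => (r.2.toList, r.1.toList.length)
         | none => ((if PySem.Chars.isalpha c then [c] else []), 1)).1
        ++ pvScanB (rest.drop
            ((match pvRules.find? (fun r : String × String => r.1.toList.isPrefixOf (c :: rest)) with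
              | some r => (r.2.toList, r.1.toList.length)
              | none => ((if PySem.Chars.isalpha c then [c] else []), 1)).2 - 1)) := by
  rw [pvScanB]
  cases hf : pvRules.find? (fun r => r.1.toList.isPrefixOf (c :: rest)) with
  | some r => simp
  | none => simp

lemma pvScanOld_step (c : Char) (rest : List Char) :
    pvScanOld (c :: rest)
      = (match pvFirstMatch (c :: rest) pvPats with
         | some k => (pvRepl k, k.length)
         | none => (pvRepl [c], 1)).1
        ++ pvScanOld (rest.drop
            ((match pvFirstMatch (c :: rest) pvPats with
              | some k => (pvRepl k, k.length)
              | none => (pvRepl [c], 1)).2 - 1)) := by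
  rw [pvScanOld]
  cases hf : pvFirstMatch (c :: rest) pvPats with
  | some k => simp
  | none => simp

lemma pvScan_eq : ∀ n (l : List Char), l.length ≤ n → pvScanB l = pvScanOld l := by
  intro n
  induction n with
  | zero =>
    intro l hl
    have : l = [] := by cases l with | nil => rfl | cons a r => simp at hl
    subst this
    rw [pvScanB, pvScanOld]
  | succ m ih =>
    intro l hl
    cases l with
    | nil => rw [pvScanB, pvScanOld]
    | cons c rest =>
      rw [pvScanB_step, pvScanOld_step, pvStepEq]
      congr 1
      apply ih
      have : (rest.drop ((match pvFirstMatch (c :: rest) pvPats with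
          | some k => (pvRepl k, k.length)
          | none => (pvRepl [c], 1)).2 - 1)).length ≤ rest.length := by
        rw [List.length_drop]; omega
      simp at hl
      omega

-- ===== VERDICT (by name: the statement is the Claim_ definition above) =====
theorem hint_to_ipa_spec : Claim_equal_hint_to_ipa := by
  intro hint _
  show hint_to_ipa hint = hint_to_ipa_alt hint
  simp only [hint_to_ipa, hint_to_ipa_alt]
  rw [pvScan_eq (PySem.Chars.strip (PySem.Chars.lower hint.toList)).length _ le_rfl]
  rw [pvMain]
  congr 1
  rw [pvSplitOn_dash]
  obtain ⟨t, ht⟩ := pvSplitC_head (PySem.Chars.strip (PySem.Chars.lower hint.toList))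
  rw [ht, pvF, ht]
  cases t with
  | nil => simp [PySem.Chars.join_singleton]
  | cons x t' => simp
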